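-- pv_equiv track=rewrite | github.com/bohui/real2ai | backend/app/agents/nodes/risk_assessment_node.py | _categorize_risks
-- ===== SOURCE A (Python) =====
-- from typing import Dict, Any, Optional, List
--
-- def _categorize_risks(
--     risk_factors: List[Dict[str, Any]]
-- ) -> Dict[str, List[Dict[str, Any]]]:
--     """Categorize risks by type."""
--     categories = {
--         "financial": [],
--         "legal": [],
--         "operational": [],
--         "regulatory": [],
--         "market": [],
--     }
--
--     for risk in risk_factors:
--         category = risk.get("category", "operational")
--         if category in categories:
--             categories[category].append(risk)
--         else:
--             categories["operational"].append(risk)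
--
--     return categories
-- ===== SOURCE B (Python) =====
-- def _categorize_risks(risk_factors):
--     """Categorize risks by type."""
--     named = {"financial", "legal", "regulatory", "market"}
--     return {
--         "financial": [r for r in risk_factors if r.get("category") == "financial"],
--         "legal": [r for r in risk_factors if r.get("category") == "legal"],
--         "operational": [r for r in risk_factors
--                         if r.get("category", "operational") not in named],
--         "regulatory": [r for r in risk_factors if r.get("category") == "regulatory"],
--         "market": [r for r in risk_factors if r.get("category") == "market"],
--     }
-- ===== Notes on version B (the rewrite author's own statement) =====
-- stated objective: alternative
-- what changed: Replaces the single mutating grouping pass over a pre-built dict with five independent list-comprehension filters, one per fixed bucket (the operational bucket catches every risk whose defaulted category is not one of the other four names).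
import Mathlib
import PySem

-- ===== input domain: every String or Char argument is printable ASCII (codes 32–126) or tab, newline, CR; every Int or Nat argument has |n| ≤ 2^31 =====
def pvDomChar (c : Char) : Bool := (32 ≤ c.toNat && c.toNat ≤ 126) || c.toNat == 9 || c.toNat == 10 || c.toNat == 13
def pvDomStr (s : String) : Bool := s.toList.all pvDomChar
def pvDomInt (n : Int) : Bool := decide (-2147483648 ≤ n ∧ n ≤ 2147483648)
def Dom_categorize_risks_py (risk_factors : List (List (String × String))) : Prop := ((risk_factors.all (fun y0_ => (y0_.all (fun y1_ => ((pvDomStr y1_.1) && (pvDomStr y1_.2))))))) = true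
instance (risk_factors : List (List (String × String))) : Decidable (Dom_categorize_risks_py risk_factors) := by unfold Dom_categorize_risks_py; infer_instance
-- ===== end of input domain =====

-- B replaces A's single mutating grouping pass with five independent per-bucket filters ("alternative": same cost, different decomposition).

-- ===== PORT A =====
-- loop body of A's 'for risk in risk_factors' (named so the fold can cite it)
def catStepA (cats : PySem.Dict String (List (List (String × String)))) (risk : List (String × String)) :
    PySem.Dict String (List (List (String × String))) :=
  let category := PySem.Dict.getD (PySem.Dict.mk risk) "category" "operational"
  if PySem.Dict.contains cats category then
    PySem.Dict.modify cats category [] (fun l => l ++ [risk])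
  else
    PySem.Dict.modify cats "operational" [] (fun l => l ++ [risk])

def categorize_risks_py (risk_factors : List (List (String × String))) : List (String × List (List (String × String))) :=
  let categories : PySem.Dict String (List (List (String × String))) :=
    (((((PySem.Dict.empty).insert "financial" []).insert "legal" []).insert "operational" []).insert "regulatory" []).insert "market" []
  (risk_factors.foldl catStepA categories).items

-- ===== PORT B =====
def catNamed : PySem.Set String := PySem.Set.ofList ["financial", "legal", "regulatory", "market"]

def categorize_risks_py_alt (risk_factors : List (List (String × String))) : List (String × List (List (String × String))) :=
  [ ("financial",   risk_factors.filter (fun r => PySem.Dict.get? (PySem.Dict.mk r) "category" == some "financial")),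
    ("legal",       risk_factors.filter (fun r => PySem.Dict.get? (PySem.Dict.mk r) "category" == some "legal")),
    ("operational", risk_factors.filter (fun r => !(PySem.Set.contains catNamed (PySem.Dict.getD (PySem.Dict.mk r) "category" "operational")))),
    ("regulatory",  risk_factors.filter (fun r => PySem.Dict.get? (PySem.Dict.mk r) "category" == some "regulatory")),
    ("market",      risk_factors.filter (fun r => PySem.Dict.get? (PySem.Dict.mk r) "category" == some "market")) ]

-- ===== PRECONDITION & SPEC =====
def Spec_categorize_risks_py (risk_factors : List (List (String × String))) (out : List (String × List (List (String × String)))) : Prop := out = categorize_risks_py_alt risk_factors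
instance (risk_factors : List (List (String × String))) (out : List (String × List (List (String × String)))) : Decidable (Spec_categorize_risks_py risk_factors out) := by unfold Spec_categorize_risks_py; infer_instance

-- ===== CLAIM (what is proved, stated in full; the proofs are below) =====
def Claim_equal_categorize_risks_py : Prop := ∀ (risk_factors : List (List (String × String))), Dom_categorize_risks_py risk_factors → Spec_categorize_risks_py risk_factors (categorize_risks_py risk_factors)

-- ===== LEMMAS AND PROOFS =====

-- the five-bucket dict A's loop maintains, with its buckets made explicit
def mk5 (f l o r m : List (List (String × String))) : PySem.Dict String (List (List (String × String))) :=
  PySem.Dict.mk [("financial", f), ("legal", l), ("operational", o), ("regulatory", r), ("market", m)]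

lemma contains5_false (f l o r m : List (List (String × String))) (v : String)
    (h1 : ¬ v = "financial") (h2 : ¬ v = "legal") (h3 : ¬ v = "operational")
    (h4 : ¬ v = "regulatory") (h5 : ¬ v = "market") :
    (mk5 f l o r m).contains v = false := by
  simp [pysem, mk5]
  exact ⟨fun h => h1 h.symm, fun h => h2 h.symm, fun h => h3 h.symm,
         fun h => h4 h.symm, fun h => h5 h.symm⟩

-- invariant of A's loop: with the five fixed buckets holding f/l/o/r/m, the fold appends each filter's catch
lemma foldl_catStepA (rf : List (List (String × String)))
    (f l o r m : List (List (String × String))) :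
    rf.foldl catStepA (mk5 f l o r m) =
      mk5 (f ++ rf.filter (fun x => PySem.Dict.get? (PySem.Dict.mk x) "category" == some "financial"))
        (l ++ rf.filter (fun x => PySem.Dict.get? (PySem.Dict.mk x) "category" == some "legal"))
        (o ++ rf.filter (fun x => !(PySem.Set.contains catNamed (PySem.Dict.getD (PySem.Dict.mk x) "category" "operational"))))
        (r ++ rf.filter (fun x => PySem.Dict.get? (PySem.Dict.mk x) "category" == some "regulatory"))
        (m ++ rf.filter (fun x => PySem.Dict.get? (PySem.Dict.mk x) "category" == some "market")) := by
  induction rf generalizing f l o r m with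
  | nil => simp [mk5]
  | cons risk rest ih =>
    rw [List.foldl_cons]
    rcases hg : PySem.Dict.get? (PySem.Dict.mk risk) "category" with _ | v
    · have hc : PySem.Dict.getD (PySem.Dict.mk risk) "category" "operational" = "operational" := by
        rw [PySem.Dict.getD_eq_get?_getD, hg]; rfl
      have e : catStepA (mk5 f l o r m) risk = mk5 f l (o ++ [risk]) r m := by
        simp only [catStepA, hc]; rfl
      rw [e, ih]
      simp [mk5, PySem.Dict.getD_eq_get?_getD, hg, catNamed, PySem.Set.contains]
    · by_cases h1 : v = "financial"
      · subst h1
        have hc : PySem.Dict.getD (PySem.Dict.mk risk) "category" "operational" = "financial" := by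
          rw [PySem.Dict.getD_eq_get?_getD, hg]; rfl
        have e : catStepA (mk5 f l o r m) risk = mk5 (f ++ [risk]) l o r m := by
          simp only [catStepA, hc]; rfl
        rw [e, ih]
        simp [mk5, PySem.Dict.getD_eq_get?_getD, hg, catNamed, PySem.Set.contains]
      by_cases h2 : v = "legal"
      · subst h2
        have hc : PySem.Dict.getD (PySem.Dict.mk risk) "category" "operational" = "legal" := by
          rw [PySem.Dict.getD_eq_get?_getD, hg]; rfl
        have e : catStepA (mk5 f l o r m) risk = mk5 f (l ++ [risk]) o r m := by
          simp only [catStepA, hc]; rfl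
        rw [e, ih]
        simp [mk5, PySem.Dict.getD_eq_get?_getD, hg, catNamed, PySem.Set.contains]
      by_cases h3 : v = "operational"
      · subst h3
        have hc : PySem.Dict.getD (PySem.Dict.mk risk) "category" "operational" = "operational" := by
          rw [PySem.Dict.getD_eq_get?_getD, hg]; rfl
        have e : catStepA (mk5 f l o r m) risk = mk5 f l (o ++ [risk]) r m := by
          simp only [catStepA, hc]; rfl
        rw [e, ih]
        simp [mk5, PySem.Dict.getD_eq_get?_getD, hg, catNamed, PySem.Set.contains]
      by_cases h4 : v = "regulatory"
      · subst h4
        have hc : PySem.Dict.getD (PySem.Dict.mk risk) "category" "operational" = "regulatory" := by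
          rw [PySem.Dict.getD_eq_get?_getD, hg]; rfl
        have e : catStepA (mk5 f l o r m) risk = mk5 f l o (r ++ [risk]) m := by
          simp only [catStepA, hc]; rfl
        rw [e, ih]
        simp [mk5, PySem.Dict.getD_eq_get?_getD, hg, catNamed, PySem.Set.contains]
      by_cases h5 : v = "market"
      · subst h5
        have hc : PySem.Dict.getD (PySem.Dict.mk risk) "category" "operational" = "market" := by
          rw [PySem.Dict.getD_eq_get?_getD, hg]; rfl
        have e : catStepA (mk5 f l o r m) risk = mk5 f l o r (m ++ [risk]) := by
          simp only [catStepA, hc]; rfl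
        rw [e, ih]
        simp [mk5, PySem.Dict.getD_eq_get?_getD, hg, catNamed, PySem.Set.contains]
      · have hc : PySem.Dict.getD (PySem.Dict.mk risk) "category" "operational" = v := by
          rw [PySem.Dict.getD_eq_get?_getD, hg]; rfl
        have e : catStepA (mk5 f l o r m) risk = mk5 f l (o ++ [risk]) r m := by
          simp only [catStepA, hc, contains5_false f l o r m v h1 h2 h3 h4 h5]; rfl
        rw [e, ih]
        simp [mk5, PySem.Dict.getD_eq_get?_getD, hg, catNamed, PySem.Set.contains,
          h1, h2, h4, h5]

-- ===== VERDICT (by name: the statement is the Claim_ definition above) =====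
theorem categorize_risks_py_spec : Claim_equal_categorize_risks_py := by
  intro rf _
  show categorize_risks_py rf = categorize_risks_py_alt rf
  have h0 : categorize_risks_py rf = (rf.foldl catStepA (mk5 [] [] [] [] [])).items := rfl
  rw [h0, foldl_catStepA]
  rfl
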